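-- pv_equiv track=rewrite | github.com/mobilemutex/dlpipkle | src/dlpipkle/platform_utils.py | categorize_platforms
-- ===== SOURCE A (Python) =====
-- from typing import Dict, List, Optional, Set, Any, Tuple
--
-- def categorize_platforms(platforms: Set[str]) -> Dict[str, List[str]]:
--     """
--     Categorize platform tags into groups.
--
--     Args:
--         platforms: Set of platform tags
--
--     Returns:
--         Dictionary mapping platform categories to lists of platform tags
--     """
--     categories = {
--         'Windows': [],
--         'macOS': [],
--         'Linux': [],
--         'Other': []
--     }
--
--     for plat in platforms:
--         if plat == 'any' or plat == 'source':
--             categories['Other'].append(plat)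
--         elif plat.startswith('win'):
--             categories['Windows'].append(plat)
--         elif plat.startswith('macosx'):
--             categories['macOS'].append(plat)
--         elif plat.startswith('manylinux') or plat.startswith('linux'):
--             categories['Linux'].append(plat)
--         else:
--             categories['Other'].append(plat)
--
--     # Remove empty categories
--     return {k: sorted(v) for k, v in categories.items() if v}
-- ===== SOURCE B (Python) =====
-- def categorize_platforms(platforms):
--     """Categorize platform tags into groups (sort once, then one filter per category)."""
--     ordered = sorted(platforms)
--
--     def category(p):
--         if p == 'any' or p == 'source':
--             return 'Other'
--         if p.startswith('win'):
--             return 'Windows'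
--         if p.startswith('macosx'):
--             return 'macOS'
--         if p.startswith('manylinux') or p.startswith('linux'):
--             return 'Linux'
--         return 'Other'
--
--     return {k: v for k in ('Windows', 'macOS', 'Linux', 'Other')
--             if (v := [p for p in ordered if category(p) == k])}
-- ===== Notes on version B (the rewrite author's own statement) =====
-- stated objective: alternative
-- what changed: B replaces A's bucket-appending dict loop with per-bucket sorts by a single global sort followed by one filter per fixed category (category computed by a total classifier function), building the result dict directly by comprehension.
import Mathlib
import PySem

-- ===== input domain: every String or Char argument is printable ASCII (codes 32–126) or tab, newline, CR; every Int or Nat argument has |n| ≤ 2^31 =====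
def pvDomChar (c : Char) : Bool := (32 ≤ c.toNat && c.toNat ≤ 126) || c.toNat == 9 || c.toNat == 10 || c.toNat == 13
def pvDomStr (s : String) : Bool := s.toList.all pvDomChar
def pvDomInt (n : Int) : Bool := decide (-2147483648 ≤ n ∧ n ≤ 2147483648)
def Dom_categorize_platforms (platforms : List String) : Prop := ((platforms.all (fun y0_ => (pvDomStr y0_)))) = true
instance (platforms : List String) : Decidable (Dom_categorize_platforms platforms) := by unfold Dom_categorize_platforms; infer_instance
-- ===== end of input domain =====

-- B builds each category by one filter over a single globally sorted list (with a total
-- classifier function) instead of A's bucket-appending dict loop followed by per-bucket sorts;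
-- objective: alternative structure, same asymptotic cost.
-- The Python A iterates over a set; its result is order-independent (fixed keys, each bucket
-- sorted), so the port iterates the list of distinct elements directly.

-- ===== PORT A =====
def categorize_platforms (platforms : List String) : List (String × List String) :=
  let categories : PySem.Dict String (List String) :=
    PySem.Dict.mk [("Windows", []), ("macOS", []), ("Linux", []), ("Other", [])]
  -- categories[k].append(plat) is exactly d.modify k [] (· ++ [plat]) (the key is always present)
  let categories := platforms.foldl (fun d plat =>
    if plat == "any" || plat == "source" then d.modify "Other" [] (· ++ [plat])
    else if PySem.Str.startswith plat "win" then d.modify "Windows" [] (· ++ [plat])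
    else if PySem.Str.startswith plat "macosx" then d.modify "macOS" [] (· ++ [plat])
    else if PySem.Str.startswith plat "manylinux" || PySem.Str.startswith plat "linux" then
      d.modify "Linux" [] (· ++ [plat])
    else d.modify "Other" [] (· ++ [plat])) categories
  -- {k: sorted(v) for k, v in categories.items() if v}: the keys are distinct, so the dict
  -- comprehension is this filter-then-map over the items list
  (categories.items.filter (fun kv => !kv.2.isEmpty)).map
    (fun kv => (kv.1, PySem.List.sorted kv.2 (fun x => x) false))

-- ===== PORT B =====
def pvCategory (p : String) : String :=
  if p == "any" || p == "source" then "Other"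
  else if PySem.Str.startswith p "win" then "Windows"
  else if PySem.Str.startswith p "macosx" then "macOS"
  else if PySem.Str.startswith p "manylinux" || PySem.Str.startswith p "linux" then "Linux"
  else "Other"

def categorize_platforms_alt (platforms : List String) : List (String × List String) :=
  let ordered := PySem.List.sorted platforms (fun x => x) false
  -- {k: v for k in (…) if (v := [p for p in ordered if category(p) == k])}
  (["Windows", "macOS", "Linux", "Other"].map
      (fun k => (k, ordered.filter (fun p => pvCategory p == k)))).filter
    (fun kv => !kv.2.isEmpty)

-- ===== PRECONDITION & SPEC =====
def Spec_categorize_platforms (platforms : List String) (out : List (String × List String)) : Prop := out = categorize_platforms_alt platforms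
instance (platforms : List String) (out : List (String × List String)) : Decidable (Spec_categorize_platforms platforms out) := by unfold Spec_categorize_platforms; infer_instance

-- ===== CLAIM (what is proved, stated in full; the proofs are below) =====
def Claim_equal_categorize_platforms : Prop := ∀ (platforms : List String), Dom_categorize_platforms platforms → Spec_categorize_platforms platforms (categorize_platforms platforms)

-- ===== LEMMAS AND PROOFS =====

-- A's loop body appends plat to the bucket named by pvCategory plat
theorem pvStep_eq (d : PySem.Dict String (List String)) (plat : String) :
    (if plat == "any" || plat == "source" then d.modify "Other" [] (· ++ [plat])
     else if PySem.Str.startswith plat "win" then d.modify "Windows" [] (· ++ [plat])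
     else if PySem.Str.startswith plat "macosx" then d.modify "macOS" [] (· ++ [plat])
     else if PySem.Str.startswith plat "manylinux" || PySem.Str.startswith plat "linux" then
       d.modify "Linux" [] (· ++ [plat])
     else d.modify "Other" [] (· ++ [plat]))
    = d.modify (pvCategory plat) [] (· ++ [plat]) := by
  unfold pvCategory
  split_ifs <;> rfl

-- the classifier hits exactly the four fixed keys
theorem pvCategory_cases (p : String) :
    pvCategory p = "Windows" ∨ pvCategory p = "macOS" ∨ pvCategory p = "Linux" ∨
    pvCategory p = "Other" := by
  unfold pvCategory
  split_ifs <;> simp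

theorem pvModify_windows (w m l o : List String) (x : String) :
    (PySem.Dict.mk [("Windows", w), ("macOS", m), ("Linux", l), ("Other", o)]).modify
      "Windows" [] (· ++ [x])
    = PySem.Dict.mk [("Windows", w ++ [x]), ("macOS", m), ("Linux", l), ("Other", o)] := by
  simp [PySem.Dict.modify, PySem.Dict.contains, PySem.Dict.insert, PySem.Dict.getD,
        PySem.Dict.get?]

theorem pvModify_macos (w m l o : List String) (x : String) :
    (PySem.Dict.mk [("Windows", w), ("macOS", m), ("Linux", l), ("Other", o)]).modify
      "macOS" [] (· ++ [x])
    = PySem.Dict.mk [("Windows", w), ("macOS", m ++ [x]), ("Linux", l), ("Other", o)] := by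
  simp [PySem.Dict.modify, PySem.Dict.contains, PySem.Dict.insert, PySem.Dict.getD,
        PySem.Dict.get?]

theorem pvModify_linux (w m l o : List String) (x : String) :
    (PySem.Dict.mk [("Windows", w), ("macOS", m), ("Linux", l), ("Other", o)]).modify
      "Linux" [] (· ++ [x])
    = PySem.Dict.mk [("Windows", w), ("macOS", m), ("Linux", l ++ [x]), ("Other", o)] := by
  simp [PySem.Dict.modify, PySem.Dict.contains, PySem.Dict.insert, PySem.Dict.getD,
        PySem.Dict.get?]

theorem pvModify_other (w m l o : List String) (x : String) :
    (PySem.Dict.mk [("Windows", w), ("macOS", m), ("Linux", l), ("Other", o)]).modify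
      "Other" [] (· ++ [x])
    = PySem.Dict.mk [("Windows", w), ("macOS", m), ("Linux", l), ("Other", o ++ [x])] := by
  simp [PySem.Dict.modify, PySem.Dict.contains, PySem.Dict.insert, PySem.Dict.getD,
        PySem.Dict.get?]

-- A's whole loop, characterised: each bucket collects its category's tags in input order
theorem pvFold_eq (xs : List String) (w m l o : List String) :
    xs.foldl (fun d plat => d.modify (pvCategory plat) [] (· ++ [plat]))
      (PySem.Dict.mk [("Windows", w), ("macOS", m), ("Linux", l), ("Other", o)])
    = PySem.Dict.mk
        [("Windows", w ++ xs.filter (fun p => pvCategory p == "Windows")),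
         ("macOS", m ++ xs.filter (fun p => pvCategory p == "macOS")),
         ("Linux", l ++ xs.filter (fun p => pvCategory p == "Linux")),
         ("Other", o ++ xs.filter (fun p => pvCategory p == "Other"))] := by
  induction xs generalizing w m l o with
  | nil => simp
  | cons x t ih =>
    rcases pvCategory_cases x with h | h | h | h <;>
      simp only [List.foldl_cons, h, pvModify_windows, pvModify_macos, pvModify_linux,
        pvModify_other, ih, List.filter_cons] <;>
      simp

-- sorting commutes with filtering (stability is irrelevant: the key is the identity)
theorem pvSorted_filter (xs : List String) (q : String → Bool) :
    PySem.List.sorted (xs.filter q) (fun x => x) false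
    = (PySem.List.sorted xs (fun x => x) false).filter q := by
  apply PySem.List.sorted_id_eq_of_perm_of_pairwise
  · exact (PySem.List.sorted_perm xs (fun x => x) false).filter q
  · exact List.Pairwise.sublist List.filter_sublist
        (PySem.List.sorted_pairwise xs (fun x => x))

-- ===== VERDICT (by name: the statement is the Claim_ definition above) =====
theorem categorize_platforms_spec : Claim_equal_categorize_platforms := by
  intro platforms _
  show _ = _
  unfold categorize_platforms categorize_platforms_alt
  dsimp only
  rw [show (fun (d : PySem.Dict String (List String)) (plat : String) =>
        if plat == "any" || plat == "source" then d.modify "Other" [] (· ++ [plat])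
        else if PySem.Str.startswith plat "win" then d.modify "Windows" [] (· ++ [plat])
        else if PySem.Str.startswith plat "macosx" then d.modify "macOS" [] (· ++ [plat])
        else if PySem.Str.startswith plat "manylinux" || PySem.Str.startswith plat "linux" then
          d.modify "Linux" [] (· ++ [plat])
        else d.modify "Other" [] (· ++ [plat]))
      = (fun d plat => d.modify (pvCategory plat) [] (· ++ [plat])) from
      funext₂ (fun d plat => pvStep_eq d plat)]
  rw [pvFold_eq]
  have he : ∀ (q : String → Bool),
      ((PySem.List.sorted platforms (fun x => x) false).filter q).isEmpty
      = (platforms.filter q).isEmpty := by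
    intro q
    rw [Bool.eq_iff_iff]
    simp only [List.isEmpty_iff_length_eq_zero,
      ((PySem.List.sorted_perm platforms (fun x => x) false).filter q).length_eq]
  by_cases h1 : (platforms.filter (fun p => pvCategory p == "Windows")).isEmpty <;>
  by_cases h2 : (platforms.filter (fun p => pvCategory p == "macOS")).isEmpty <;>
  by_cases h3 : (platforms.filter (fun p => pvCategory p == "Linux")).isEmpty <;>
  by_cases h4 : (platforms.filter (fun p => pvCategory p == "Other")).isEmpty <;>
    simp [pvSorted_filter, he, h1, h2, h3, h4]
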